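-- pv_equiv track=rewrite | github.com/Mexikarolos/AskisisPython | Askisi9.py | MaxLength0
-- ===== SOURCE A (Python) =====
-- def MaxLength0(array, n):
--     count0 = 0
--     result0 = 0
--
--     for i in range(0, n):
--         if (array[i] == "1" or array[i] == " "):
--             count0 = 0
--
--         else:
--             count0 += 1
--             result0 = max(result0, count0)
--
--     return result0
-- ===== SOURCE B (Python) =====
-- def MaxLength0(array, n):
--     vals = [array[i] for i in range(n)]
--     best = 0
--     i = 0
--     m = len(vals)
--     while i < m:
--         if vals[i] == "1" or vals[i] == " ":
--             i += 1
--         else: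
--             j = i
--             while j < m and vals[j] != "1" and vals[j] != " ":
--                 j += 1
--             if j - i > best:
--                 best = j - i
--             i = j
--     return best
-- ===== Notes on version B (the rewrite author's own statement) =====
-- stated objective: alternative
-- what changed: B first materialises the prefix, then scans it run-by-run: it skips separators and measures each maximal non-'1'/non-' ' run with an inner pointer, taking the maximum of whole run lengths, instead of A's per-element counter that is reset and re-maxed at every step.
import Mathlib
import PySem

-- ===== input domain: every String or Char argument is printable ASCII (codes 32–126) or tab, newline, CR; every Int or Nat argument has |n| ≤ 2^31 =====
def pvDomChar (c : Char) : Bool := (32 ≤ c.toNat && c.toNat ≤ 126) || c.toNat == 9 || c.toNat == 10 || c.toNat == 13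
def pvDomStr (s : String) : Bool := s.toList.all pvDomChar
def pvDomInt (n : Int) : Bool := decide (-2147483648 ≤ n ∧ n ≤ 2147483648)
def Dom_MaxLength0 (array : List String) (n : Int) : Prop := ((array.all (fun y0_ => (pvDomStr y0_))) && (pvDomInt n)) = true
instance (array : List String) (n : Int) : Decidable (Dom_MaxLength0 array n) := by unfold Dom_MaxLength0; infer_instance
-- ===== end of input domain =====

-- B scans the prefix run-by-run (skip separators, measure whole maximal runs) instead of A's reset counter; same cost, different decomposition.

-- ===== PORT A =====
-- for i in range(0, n): reset count0 on "1"/" ", else count0 += 1 and result0 = max(result0, count0)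
def MaxLength0 (array : List String) (n : Int) : Int :=
  ((PySem.List.pyRange 0 n 1).foldl
    (fun st i =>
      let c := PySem.List.pyGetD array i ""   -- array[i]; in range under Pre_
      if c = "1" ∨ c = " " then ((0 : Int), st.2)
      else (st.1 + 1, max st.2 (st.1 + 1)))
    ((0 : Int), (0 : Int))).2

-- ===== PORT B =====
def pvSep (c : String) : Bool := c == "1" || c == " "

-- the outer while loop of Source B on the suffix vals[i:]: skip a separator, or take a whole maximal run
def pvMaxRun : List String → Int
  | [] => 0
  | c :: r =>
    if h : pvSep c then pvMaxRun r
    else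
      max (Int.ofNat ((c :: r).takeWhile (fun x => !pvSep x)).length)
          (pvMaxRun ((c :: r).dropWhile (fun x => !pvSep x)))
termination_by l => l.length
decreasing_by
  · simp
  · have hle := List.length_dropWhile_le (fun x => !pvSep x) r
    simp [h]
    omega

def MaxLength0_alt (array : List String) (n : Int) : Int :=
  pvMaxRun (array.take n.toNat)   -- vals = [array[i] for i in range(n)]; valid under Pre_

-- ===== PRECONDITION & SPEC =====
-- A raises IndexError when n > len(array); exactly those inputs are excluded.
def Pre_MaxLength0 (array : List String) (n : Int) : Prop := n ≤ array.length
instance (array : List String) (n : Int) : Decidable (Pre_MaxLength0 array n) := by unfold Pre_MaxLength0; infer_instance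
def pvWitness_MaxLength0 : List String × Int := (["a", "1", "bb"], 3)

def Spec_MaxLength0 (array : List String) (n : Int) (out : Int) : Prop := out = MaxLength0_alt array n
instance (array : List String) (n : Int) (out : Int) : Decidable (Spec_MaxLength0 array n out) := by unfold Spec_MaxLength0; infer_instance

-- ===== CLAIM (what is proved, stated in full; the proofs are below) =====
def Claim_equal_MaxLength0 : Prop := ∀ (array : List String) (n : Int), Dom_MaxLength0 array n → Pre_MaxLength0 array n → Spec_MaxLength0 array n (MaxLength0 array n)

-- ===== LEMMAS AND PROOFS =====

-- A's loop body as a function of the current element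
def pvStepA (st : Int × Int) (c : String) : Int × Int :=
  if c = "1" ∨ c = " " then ((0 : Int), st.2)
  else (st.1 + 1, max st.2 (st.1 + 1))

-- the "new maximum contributed by the rest of the list, starting with a run already c long"
def pvA' (c : Int) : List String → Int
  | [] => 0
  | x :: t => if x = "1" ∨ x = " " then pvA' 0 t else max (c + 1) (pvA' (c + 1) t)

theorem pvSep_iff (c : String) : pvSep c = true ↔ (c = "1" ∨ c = " ") := by
  simp [pvSep]

theorem foldl_stepA (l : List String) : ∀ c r : Int, 0 ≤ c → c ≤ r →
    (l.foldl pvStepA (c, r)).2 = max r (pvA' c l) := by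
  induction l with
  | nil => intro c r h0 h1; simp [pvA']; omega
  | cons x t ih =>
    intro c r h0 h1
    by_cases hx : x = "1" ∨ x = " "
    · simp [pvStepA, pvA', hx]
      rw [ih 0 r le_rfl (le_trans h0 h1)]
    · simp [pvStepA, pvA', hx]
      rw [ih (c + 1) (max r (c + 1)) (by omega) (by omega)]
      omega

-- the value of pvA' c, phrased through pvMaxRun
theorem pvA'_eq (l : List String) : ∀ c : Int, 0 ≤ c →
    pvA' c l = (match l with
      | [] => 0
      | x :: t => if pvSep x then pvMaxRun (x :: t)
          else max (c + Int.ofNat ((x :: t).takeWhile (fun y => !pvSep y)).length)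
                   (pvMaxRun ((x :: t).dropWhile (fun y => !pvSep y)))) := by
  induction l with
  | nil => intro c _; simp [pvA']
  | cons x t ih =>
    intro c hc
    by_cases hx : pvSep x
    · simp only [hx, if_true]
      have hx' := (pvSep_iff x).mp hx
      rw [pvA', if_pos hx', pvMaxRun, dif_pos hx]
      rcases t with _ | ⟨y, t'⟩
      · simp [pvA', pvMaxRun]
      · rw [ih 0 le_rfl]
        by_cases hy : pvSep y
        · simp [hy]
        · simp only [hy, if_false]
          rw [pvMaxRun, dif_neg hy]
          simp
    · have hx' : ¬ (x = "1" ∨ x = " ") := fun h => hx ((pvSep_iff x).mpr h)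
      simp only [hx, if_false]
      rw [pvA', if_neg hx']
      simp only [List.takeWhile_cons, List.dropWhile_cons, hx, Bool.not_false, if_true]
      rcases t with _ | ⟨y, t'⟩
      · simp [pvA', pvMaxRun]
      · rw [ih (c + 1) (by omega)]
        by_cases hy : pvSep y
        · simp only [hy, if_true]
          simp only [List.takeWhile_cons, List.dropWhile_cons, hy, Bool.not_true]
          simp only [Bool.false_eq_true, if_false, ite_true, List.length_cons, List.length_nil]
          simp only [List.takeWhile_nil, List.length_nil] at *
          push_cast
          omega
        · simp only [hy, if_false]
          simp only [List.takeWhile_cons, List.dropWhile_cons, hy, Bool.not_false, if_true]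
          simp only [List.length_cons, Int.ofNat_eq_natCast]
          push_cast
          omega

theorem pvA'_zero (l : List String) : pvA' 0 l = pvMaxRun l := by
  rw [pvA'_eq l 0 le_rfl]
  rcases l with _ | ⟨x, t⟩
  · simp [pvMaxRun]
  · by_cases hx : pvSep x
    · simp [hx]
    · simp only [hx, if_false]
      rw [pvMaxRun, dif_neg hx]
      simp

-- ===== VERDICT (by name: the statement is the Claim_ definition above) =====
theorem MaxLength0_spec : Claim_equal_MaxLength0 := by
  intro array n _ hpre
  unfold Spec_MaxLength0 MaxLength0 MaxLength0_alt
  by_cases hn : n ≤ 0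
  · rw [PySem.List.pyRange_one_eq_nil hn]
    have : n.toNat = 0 := by omega
    simp [this, pvMaxRun]
  · push_neg at hn
    set vals := array.take n.toNat with hvals
    have hlen : vals.length = n.toNat := by
      rw [hvals, List.length_take]
      unfold Pre_MaxLength0 at hpre
      omega
    have hrange : PySem.List.pyRange 0 n 1 = PySem.List.pyRange 0 (vals.length) 1 := by
      rw [hlen]
      congr 1
      omega
    have hget : ∀ (st : Int × Int) (i : Int), i ∈ PySem.List.pyRange 0 (vals.length) 1 →
        (fun st i => pvStepA st (PySem.List.pyGetD array i "")) st i
        = (fun st i => pvStepA st (PySem.List.pyGetD vals i "")) st i := by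
      intro st i hi
      rw [PySem.List.mem_pyRange_one] at hi
      have h1 : PySem.List.pyGetD array i "" = PySem.List.pyGetD vals i "" := by
        rw [PySem.List.pyGetD_eq_getElem (xs := array) (i := i) (d := "") hi.1
              (by unfold Pre_MaxLength0 at hpre; omega),
            PySem.List.pyGetD_eq_getElem (xs := vals) (i := i) (d := "") hi.1 (by omega)]
        simp only [hvals, List.getElem_take]
      show pvStepA st (PySem.List.pyGetD array i "") = pvStepA st (PySem.List.pyGetD vals i "")
      rw [h1]
    have hfold : (PySem.List.pyRange 0 n 1).foldl
        (fun st i => pvStepA st (PySem.List.pyGetD array i "")) ((0 : Int), (0 : Int))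
        = vals.foldl pvStepA ((0 : Int), (0 : Int)) := by
      rw [hrange]
      rw [PySem.List.foldl_congr_mem (PySem.List.pyRange 0 (vals.length) 1) _ _ _ hget]
      exact PySem.List.foldl_pyRange_zero_pyGetD vals "" pvStepA ((0 : Int), (0 : Int))
    show ((PySem.List.pyRange 0 n 1).foldl
        (fun st i => pvStepA st (PySem.List.pyGetD array i "")) ((0 : Int), (0 : Int))).2
        = pvMaxRun vals
    rw [hfold, foldl_stepA vals 0 0 le_rfl le_rfl, pvA'_zero]
    have : 0 ≤ pvMaxRun vals := by
      clear hfold hget hrange hlen hvals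
      induction vals using pvMaxRun.induct with
      | case1 => simp [pvMaxRun]
      | case2 c r h ih => rw [pvMaxRun, dif_pos h]; exact ih
      | case3 c r h ih => rw [pvMaxRun, dif_neg h]; omega
    omega
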